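-- pv_equiv track=rewrite | github.com/myungjunChae/Algorithm | codility/Triangle/main.py | solution
-- ===== SOURCE A (Python) =====
-- import bisect
--
-- def solution(A):
--     A = sorted(A)
--
--     for i,a in enumerate(A):
--       for j in range(i+1,len(A)-1):
--         b=bisect.bisect_left(A,A[i]+A[j])
--         if b > j+1:
--           return 1
--     return 0
-- ===== SOURCE B (Python) =====
-- def solution(A):
--     A = sorted(A)
--     for a, b, c in zip(A, A[1:], A[2:]):
--         if a + b > c:
--             return 1
--     return 0
-- ===== Notes on version B (the rewrite author's own statement) =====
-- stated objective: faster
-- what changed: Replaces the double loop over index pairs with a bisect probe per pair by a single linear scan of consecutive triples of the sorted array (a+b>c), which detects a triangle triple iff any pair does.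
import Mathlib
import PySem

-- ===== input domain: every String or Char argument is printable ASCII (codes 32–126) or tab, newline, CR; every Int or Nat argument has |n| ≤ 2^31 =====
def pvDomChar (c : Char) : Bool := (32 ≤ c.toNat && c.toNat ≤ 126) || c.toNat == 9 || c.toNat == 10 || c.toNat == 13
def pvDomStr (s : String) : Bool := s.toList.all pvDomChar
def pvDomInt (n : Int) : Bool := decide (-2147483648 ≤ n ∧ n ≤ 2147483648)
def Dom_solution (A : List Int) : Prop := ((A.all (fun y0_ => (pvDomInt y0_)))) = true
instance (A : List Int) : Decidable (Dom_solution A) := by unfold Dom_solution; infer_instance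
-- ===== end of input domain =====

-- B replaces A's pairwise bisect probes by one linear scan of consecutive sorted triples (faster, asymptotic).

-- ===== PORT A =====
-- Literal port of A: sort, then for each (i, a) in enumerate, for j in range(i+1, len(A)-1),
-- bisect.bisect_left(A, A[i]+A[j]) > j+1 returns 1 early (the nested early return is the `any`).
def solution (A : List Int) : Int :=
  let S := PySem.List.sorted A (fun x => x)
  if (PySem.List.enumerate S 0).any (fun ia =>
      (PySem.List.pyRange (ia.1 + 1) ((S.length : Int) - 1) 1).any (fun j =>
        decide (((PySem.List.bisectLeft S (ia.2 + PySem.List.pyGetD S j 0) : Int)) > j + 1)))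
  then 1 else 0

-- ===== PORT B =====
-- Source B's zip(A, A[1:], A[2:]) scan: structural recursion over consecutive triples.
def checkTriples : List Int → Bool
  | a :: b :: c :: rest => decide (a + b > c) || checkTriples (b :: c :: rest)
  | _ => false

def solution_alt (A : List Int) : Int :=
  if checkTriples (PySem.List.sorted A (fun x => x)) then 1 else 0

-- ===== PRECONDITION & SPEC =====
def Spec_solution (A : List Int) (out : Int) : Prop := out = solution_alt A
instance (A : List Int) (out : Int) : Decidable (Spec_solution A out) := by unfold Spec_solution; infer_instance

-- ===== CLAIM (what is proved, stated in full; the proofs are below) =====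
def Claim_equal_solution : Prop := ∀ (A : List Int), Dom_solution A → Spec_solution A (solution A)

-- ===== LEMMAS AND PROOFS =====

-- monotonicity of a pairwise-≤ list at indices
theorem getElem_mono_of_pairwise (S : List Int) (h : S.Pairwise (· ≤ ·))
    {i j : Nat} (hij : i ≤ j) (hj : j < S.length) :
    S[i]'(lt_of_le_of_lt hij hj) ≤ S[j] := by
  rcases Nat.lt_or_ge i j with hlt | hge
  · exact (List.pairwise_iff_getElem.mp h) i j (lt_of_le_of_lt hij hj) hj hlt
  · have : i = j := le_antisymm hij hge
    subst this; exact le_refl _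

-- checkTriples finds exactly the consecutive triples with a+b>c
theorem checkTriples_iff (S : List Int) :
    checkTriples S = true ↔
      ∃ t : Nat, ∃ h : t + 2 < S.length,
        S[t+2] < S[t]'(by omega) + S[t+1]'(by omega) := by
  induction S with
  | nil => simp [checkTriples]
  | cons a xs ih =>
    match xs, ih with
    | [], _ => simp [checkTriples]
    | [b], _ => simp [checkTriples]
    | b :: c :: rest, ih =>
      constructor
      · intro h
        rw [checkTriples] at h
        rcases Bool.or_eq_true_iff.mp h with h1 | h2
        · exact ⟨0, by simp, by simpa using of_decide_eq_true h1⟩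
        · rcases ih.mp h2 with ⟨t, ht, hlt⟩
          exact ⟨t + 1, by simpa using ht, by simpa using hlt⟩
      · rintro ⟨t, ht, hlt⟩
        rw [checkTriples, Bool.or_eq_true_iff]
        cases t with
        | zero => exact Or.inl (decide_eq_true (by simpa using hlt))
        | succ s =>
          exact Or.inr (ih.mpr ⟨s, by simpa using ht, by simpa using hlt⟩)

-- A's nested search on the sorted list finds a pair iff some consecutive triple works
theorem any_imp_check (S : List Int) (hs : S.Pairwise (· ≤ ·))
    (hany : ((PySem.List.enumerate S 0).any (fun ia =>
        (PySem.List.pyRange (ia.1 + 1) ((S.length : Int) - 1) 1).any (fun j =>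
          decide (((PySem.List.bisectLeft S (ia.2 + PySem.List.pyGetD S j 0) : Int)) > j + 1)))) = true) :
    checkTriples S = true := by
  rcases List.any_eq_true.mp hany with ⟨ia, hmem, hinner⟩
  rcases (PySem.List.mem_enumerate_iff S 0 ia).mp hmem with ⟨k, hk, hia⟩
  subst hia
  rcases List.any_eq_true.mp hinner with ⟨j, hjmem, hcond⟩
  simp only at hcond
  rcases PySem.List.mem_pyRange_one.mp hjmem with ⟨hj1, hj2⟩
  have hj0 : 0 ≤ j := by omega
  set jn := j.toNat with hjn
  have hjeq : (jn : Int) = j := Int.toNat_of_nonneg hj0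
  have hkjn : k + 1 ≤ jn := by omega
  have hble := (PySem.List.bisectLeft_spec S (S[k] + PySem.List.pyGetD S j 0) hs).1
  have hjnlt : jn + 1 < S.length := by
    have hgt := of_decide_eq_true hcond
    omega
  have hjget : PySem.List.pyGetD S j 0 = S[jn]'(by omega) := by
    rw [PySem.List.pyGetD_eq_getElem S 0 hj0 (by omega)]
  set v := S[k] + PySem.List.pyGetD S j 0 with hv
  have hgtN : jn + 1 < PySem.List.bisectLeft S v := by
    have := of_decide_eq_true hcond
    omega
  have hlt : S[jn+1]'(hjnlt) < v :=
    (PySem.List.bisectLeft_spec S v hs).2.1 (jn+1) hjnlt hgtN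
  have hSk : S[k] ≤ S[jn-1]'(by omega) := getElem_mono_of_pairwise S hs (by omega) (by omega)
  refine (checkTriples_iff S).mpr ⟨jn - 1, by omega, ?_⟩
  have h1 : jn - 1 + 2 = jn + 1 := by omega
  have h2 : jn - 1 + 1 = jn := by omega
  simp only [h1, h2]
  calc S[jn+1]'(hjnlt) < v := hlt
    _ = S[k] + S[jn]'(by omega) := by rw [hv, hjget]
    _ ≤ S[jn-1]'(by omega) + S[jn]'(by omega) := add_le_add hSk le_rfl

theorem check_imp_any (S : List Int) (hs : S.Pairwise (· ≤ ·))
    (hc : checkTriples S = true) :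
    ((PySem.List.enumerate S 0).any (fun ia =>
        (PySem.List.pyRange (ia.1 + 1) ((S.length : Int) - 1) 1).any (fun j =>
          decide (((PySem.List.bisectLeft S (ia.2 + PySem.List.pyGetD S j 0) : Int)) > j + 1)))) = true := by
  rcases (checkTriples_iff S).mp hc with ⟨t, ht, hlt⟩
  rw [List.any_eq_true]
  refine ⟨(0 + (t : Int), S[t]'(by omega)), (PySem.List.mem_enumerate_iff S 0 _).mpr ⟨t, by omega, rfl⟩, ?_⟩
  rw [List.any_eq_true]
  refine ⟨(0 + (t : Int)) + 1, ?_, ?_⟩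
  · exact PySem.List.mem_pyRange_one.mpr ⟨by omega, by omega⟩
  · simp only
    apply decide_eq_true
    set v := S[t]'(by omega) + PySem.List.pyGetD S ((0 + (t:Int)) + 1) 0 with hv
    have hget : PySem.List.pyGetD S ((0 + (t:Int)) + 1) 0 = S[t+1]'(by omega) := by
      rw [PySem.List.pyGetD_eq_getElem S 0 (by omega) (by omega)]
      congr 1; omega
    have hgtN : t + 2 < PySem.List.bisectLeft S v := by
      by_contra hle
      have hle' : PySem.List.bisectLeft S v ≤ t + 2 := by omega
      have := (PySem.List.bisectLeft_spec S v hs).2.2 (t+2) ht hle'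
      rw [hv, hget] at this
      omega
    omega

theorem any_eq_checkTriples (S : List Int) (hs : S.Pairwise (· ≤ ·)) :
    ((PySem.List.enumerate S 0).any (fun ia =>
        (PySem.List.pyRange (ia.1 + 1) ((S.length : Int) - 1) 1).any (fun j =>
          decide (((PySem.List.bisectLeft S (ia.2 + PySem.List.pyGetD S j 0) : Int)) > j + 1))))
      = checkTriples S := by
  cases hc : checkTriples S with
  | true => exact check_imp_any S hs hc
  | false =>
    cases ha : ((PySem.List.enumerate S 0).any (fun ia =>
        (PySem.List.pyRange (ia.1 + 1) ((S.length : Int) - 1) 1).any (fun j =>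
          decide (((PySem.List.bisectLeft S (ia.2 + PySem.List.pyGetD S j 0) : Int)) > j + 1)))) with
    | false => rfl
    | true => rw [any_imp_check S hs ha] at hc; exact absurd hc (by simp)

-- ===== VERDICT (by name: the statement is the Claim_ definition above) =====
theorem solution_spec : Claim_equal_solution := by
  intro A _
  unfold Spec_solution solution solution_alt
  simp only
  rw [any_eq_checkTriples (PySem.List.sorted A (fun x => x))
    (by simpa using PySem.List.sorted_pairwise A (fun x => x))]
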